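-- pv_equiv track=rewrite | github.com/fernandacodes/UFAM_atividades | 1_periodo/atv_mercosul.py | placa
-- ===== SOURCE A (Python) =====
-- def valida_placa(x):
--     contL = 0
--     contn = 0
--     for i in range(48,58):
--         for j in range(len(x)):
--             if(x[j]==chr(i)):
--                 contn = contn+1
--     for i in range(65,123):
--         for j in range(len(x)):
--             if(x[j]==chr(i)):
--                 contL = contL+1
--     if(contL !=4 and contn!=3):
--         return False
--     else:
--         return True
--
-- def placa(x):
--     c=0
--     for i in range(48,58):
--         if(x[5]==chr(i)):
--             c +=1
--     if(valida_placa(x)==False):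
--         return 'nada'
--     elif(c>0):
--         return 'carro'
--     else:
--         return 'moto'
-- ===== SOURCE B (Python) =====
-- def placa(x):
--     is_car = '0' <= x[5] <= '9'
--     digits = 0
--     letters = 0
--     for ch in x:
--         o = ord(ch)
--         if 48 <= o <= 57:
--             digits += 1
--         elif 65 <= o <= 122:
--             letters += 1
--     if letters != 4 and digits != 3:
--         return 'nada'
--     return 'carro' if is_car else 'moto'
-- ===== Notes on version B (the rewrite author's own statement) =====
-- stated objective: simpler
-- what changed: Replaces A's three loops over character-code ranges (68 passes over the string in total) by a single pass over the string with two counters plus one range test on x[5].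
import Mathlib
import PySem

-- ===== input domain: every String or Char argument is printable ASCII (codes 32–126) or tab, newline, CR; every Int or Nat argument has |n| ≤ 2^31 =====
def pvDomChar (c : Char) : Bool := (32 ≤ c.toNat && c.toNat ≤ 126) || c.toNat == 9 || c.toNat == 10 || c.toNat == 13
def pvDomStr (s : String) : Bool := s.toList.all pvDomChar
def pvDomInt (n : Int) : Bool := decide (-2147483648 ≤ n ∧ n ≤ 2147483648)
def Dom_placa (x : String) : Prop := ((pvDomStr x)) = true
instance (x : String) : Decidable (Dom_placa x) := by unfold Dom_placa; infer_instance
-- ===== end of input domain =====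

-- B replaces A's three loops over character-code ranges (68 passes over the string) by a
-- single pass over the string with two counters plus one range test on x[5] (objective: simpler).

-- ===== PORT A =====
-- x[j] with j in range(len(x)) is always in range, so it is ported with pyGetD (exact here).
def valida_placa (x : String) : Bool :=
  let xs := x.toList
  let contn : Int := (PySem.List.pyRange 48 58 1).foldl (fun contn i =>
    (PySem.List.pyRange 0 (xs.length : Int) 1).foldl (fun contn j =>
      if PySem.List.pyGetD xs j ' ' == Char.ofNat i.toNat then contn + 1 else contn) contn) 0
  let contL : Int := (PySem.List.pyRange 65 123 1).foldl (fun contL i =>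
    (PySem.List.pyRange 0 (xs.length : Int) 1).foldl (fun contL j =>
      if PySem.List.pyGetD xs j ' ' == Char.ofNat i.toNat then contL + 1 else contL) contL) 0
  if contL ≠ 4 ∧ contn ≠ 3 then false else true

def placa (x : String) : String :=
  match PySem.Str.pyGet? x 5 with
  | none => "nada"  -- unreachable under Pre_placa: Python raises IndexError here
  | some x5 =>
    let c : Int := (PySem.List.pyRange 48 58 1).foldl (fun c i =>
      if x5 == Char.ofNat i.toNat then c + 1 else c) 0
    if valida_placa x = false then "nada"
    else if c > 0 then "carro"
    else "moto"

-- ===== PORT B =====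
def placa_alt (x : String) : String :=
  match PySem.Str.pyGet? x 5 with
  | none => "nada"  -- unreachable under Pre_placa: Python raises IndexError here
  | some x5 =>
    let is_car : Bool := '0' ≤ x5 && x5 ≤ '9'
    let dl : Int × Int := x.toList.foldl (fun p ch =>
      let o := ch.toNat
      if 48 ≤ o ∧ o ≤ 57 then (p.1 + 1, p.2)
      else if 65 ≤ o ∧ o ≤ 122 then (p.1, p.2 + 1)
      else p) (0, 0)
    if dl.2 ≠ 4 ∧ dl.1 ≠ 3 then "nada"
    else if is_car then "carro" else "moto"

-- ===== PRECONDITION & SPEC =====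
-- Pre_ excludes exactly the strings of length < 6, on which Python A raises IndexError at x[5].
def Pre_placa (x : String) : Prop := 6 ≤ x.toList.length
instance (x : String) : Decidable (Pre_placa x) := by unfold Pre_placa; infer_instance
def pvWitness_placa : String := "ABC1D23"
def Spec_placa (x : String) (out : String) : Prop := out = placa_alt x
instance (x : String) (out : String) : Decidable (Spec_placa x out) := by unfold Spec_placa; infer_instance

-- ===== CLAIM (what is proved, stated in full; the proofs are below) =====
def Claim_equal_placa : Prop := ∀ (x : String), Dom_placa x → Pre_placa x → Spec_placa x (placa x)

-- ===== LEMMAS AND PROOFS =====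

theorem char_ofNat_eq_iff (n : Nat) (hn : n < 55296) (a : Char) : a = Char.ofNat n ↔ a.toNat = n := by
  constructor
  · rintro rfl
    simp [Char.ofNat, Nat.isValidChar, hn, Char.toNat, Char.ofNatAux]
  · intro h
    apply Char.ext
    apply UInt32.toNat.inj
    simp [Char.ofNat, Nat.isValidChar, hn, Char.ofNatAux]
    omega

theorem sum_ind (a : Char) : ∀ (k : Nat) (lo hi : Int), (hi - lo).toNat ≤ k → 0 ≤ lo → hi ≤ 55296 →
    ((PySem.List.pyRange lo hi 1).map (fun i => if a == Char.ofNat i.toNat then (1:Int) else 0)).sum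
    = if lo ≤ (a.toNat : Int) ∧ (a.toNat : Int) < hi then 1 else 0 := by
  intro k
  induction k with
  | zero =>
    intro lo hi hk h0 hh
    rw [PySem.List.pyRange_one_eq_nil (by omega)]
    simp; omega
  | succ k ih =>
    intro lo hi hk h0 hh
    by_cases h : hi ≤ lo
    · rw [PySem.List.pyRange_one_eq_nil h]; simp; omega
    · rw [PySem.List.pyRange_one_cons (by omega)]
      rw [List.map_cons, List.sum_cons, ih (lo+1) hi (by omega) (by omega) hh]
      have hmem : (a == Char.ofNat lo.toNat) = decide ((a.toNat : Int) = lo) := by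
        rw [Bool.eq_iff_iff]
        simp only [beq_iff_eq, decide_eq_true_eq]
        rw [char_ofNat_eq_iff lo.toNat (by omega) a]
        omega
      rw [hmem]
      split_ifs <;> simp_all <;> omega

theorem sum_count (lo hi : Int) (h0 : 0 ≤ lo) (hh : hi ≤ 55296) (xs : List Char) :
    ((PySem.List.pyRange lo hi 1).map (fun i => (xs.count (Char.ofNat i.toNat) : Int))).sum
    = (xs.countP (fun ch => decide (lo ≤ (ch.toNat:Int) ∧ (ch.toNat:Int) < hi)) : Int) := by
  induction xs with
  | nil => simp
  | cons a t ih =>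
    have hpt : ∀ i : Int, ((a :: t).count (Char.ofNat i.toNat) : Int)
        = (t.count (Char.ofNat i.toNat) : Int) + (if a == Char.ofNat i.toNat then (1:Int) else 0) := by
      intro i
      rw [List.count_cons]
      split_ifs with h <;> simp
    rw [List.map_congr_left (fun i _ => hpt i), PySem.List.sum_map_add_int, ih,
        sum_ind a ((hi - lo).toNat) lo hi le_rfl h0 hh, List.countP_cons]
    push_cast
    simp only [decide_eq_true_eq]

theorem double_count (xs : List Char) (lo hi : Int) (h0 : 0 ≤ lo) (hh : hi ≤ 55296) (a0 : Int) :
    (PySem.List.pyRange lo hi 1).foldl (fun cont i =>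
      (PySem.List.pyRange 0 (xs.length : Int) 1).foldl (fun cont j =>
        if PySem.List.pyGetD xs j ' ' == Char.ofNat i.toNat then cont + 1 else cont) cont) a0
    = a0 + (xs.countP (fun ch => decide (lo ≤ (ch.toNat:Int) ∧ (ch.toNat:Int) < hi)) : Int) := by
  have hin : ∀ (acc i : Int), i ∈ PySem.List.pyRange lo hi 1 →
      (PySem.List.pyRange 0 (xs.length : Int) 1).foldl (fun cont j =>
        if PySem.List.pyGetD xs j ' ' == Char.ofNat i.toNat then cont + 1 else cont) acc
      = acc + (xs.count (Char.ofNat i.toNat) : Int) := by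
    intro acc i _
    rw [PySem.List.foldl_pyRange_zero_pyGetD' xs ' '
      (fun acc v => if v == Char.ofNat i.toNat then acc + 1 else acc) acc]
    exact PySem.List.foldl_beq_add_one xs _ acc
  rw [PySem.List.foldl_congr_mem (PySem.List.pyRange lo hi 1)
        (fun cont i => (PySem.List.pyRange 0 (xs.length : Int) 1).foldl (fun cont j =>
          if PySem.List.pyGetD xs j ' ' == Char.ofNat i.toNat then cont + 1 else cont) cont)
        (fun acc i => acc + (xs.count (Char.ofNat i.toNat) : Int)) a0
        (fun acc i hi' => hin acc i hi'),
      PySem.List.foldl_add, sum_count lo hi h0 hh xs]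

theorem alt_fold (xs : List Char) :
    xs.foldl (fun (p : Int × Int) ch =>
      let o := ch.toNat
      if 48 ≤ o ∧ o ≤ 57 then (p.1 + 1, p.2)
      else if 65 ≤ o ∧ o ≤ 122 then (p.1, p.2 + 1)
      else p) ((0:Int), (0:Int))
    = ((xs.countP (fun ch => decide (48 ≤ ch.toNat ∧ ch.toNat ≤ 57)) : Int),
       (xs.countP (fun ch => decide (65 ≤ ch.toNat ∧ ch.toNat ≤ 122)) : Int)) := by
  have hsplit : (fun (p : Int × Int) (ch : Char) =>
      let o := ch.toNat
      if 48 ≤ o ∧ o ≤ 57 then (p.1 + 1, p.2)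
      else if 65 ≤ o ∧ o ≤ 122 then (p.1, p.2 + 1)
      else p)
    = (fun (s : Int × Int) (e : Char) =>
      ((fun (d : Int) (ch : Char) => if 48 ≤ ch.toNat ∧ ch.toNat ≤ 57 then d + 1 else d) s.1 e,
       (fun (l : Int) (ch : Char) => if 48 ≤ ch.toNat ∧ ch.toNat ≤ 57 then l
          else if 65 ≤ ch.toNat ∧ ch.toNat ≤ 122 then l + 1 else l) s.2 e)) := by
    funext p ch
    dsimp only
    split_ifs <;> rfl
  rw [hsplit, PySem.List.foldl_prod_mk
      (fun (d : Int) (ch : Char) => if 48 ≤ ch.toNat ∧ ch.toNat ≤ 57 then d + 1 else d)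
      (fun (l : Int) (ch : Char) => if 48 ≤ ch.toNat ∧ ch.toNat ≤ 57 then l
        else if 65 ≤ ch.toNat ∧ ch.toNat ≤ 122 then l + 1 else l) xs 0 0]
  have h2 : xs.foldl (fun (l : Int) (ch : Char) => if 48 ≤ ch.toNat ∧ ch.toNat ≤ 57 then l
      else if 65 ≤ ch.toNat ∧ ch.toNat ≤ 122 then l + 1 else l) 0
      = xs.foldl (fun (l : Int) (ch : Char) => if 65 ≤ ch.toNat ∧ ch.toNat ≤ 122 then l + 1 else l) 0 := by
    apply PySem.List.foldl_congr_mem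
    intro acc ch _
    dsimp only
    split_ifs <;> first | rfl | omega
  rw [h2, PySem.List.foldl_ite_add_one (fun ch => 48 ≤ ch.toNat ∧ ch.toNat ≤ 57) xs 0,
      PySem.List.foldl_ite_add_one (fun ch => 65 ≤ ch.toNat ∧ ch.toNat ≤ 122) xs 0]
  simp

-- ===== VERDICT (by name: the statement is the Claim_ definition above) =====
theorem placa_spec : Claim_equal_placa := by
  intro x _ hpre
  unfold Pre_placa at hpre
  unfold Spec_placa placa placa_alt
  have h5 : PySem.Str.pyGet? x 5 = some (x.toList.get ⟨5, by omega⟩) := by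
    rw [show (5:Int) = ((5:Nat):Int) from rfl, PySem.Str.pyGet?_natCast]
    simp [List.getElem?_eq_getElem (by omega : 5 < x.toList.length)]
  rw [h5]
  set x5 := x.toList.get ⟨5, by omega⟩ with hx5
  unfold valida_placa
  dsimp only
  -- A's counters equal B's counters
  have hA1 := double_count x.toList 48 58 (by norm_num) (by norm_num) 0
  have hA2 := double_count x.toList 65 123 (by norm_num) (by norm_num) 0
  have hB := alt_fold x.toList
  have hdig : x.toList.countP (fun ch => decide (48 ≤ (ch.toNat:Int) ∧ (ch.toNat:Int) < 58))
      = x.toList.countP (fun ch => decide (48 ≤ ch.toNat ∧ ch.toNat ≤ 57)) := by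
    apply List.countP_congr
    intro a _
    simp only [decide_eq_true_eq]
    omega
  have hlet : x.toList.countP (fun ch => decide (65 ≤ (ch.toNat:Int) ∧ (ch.toNat:Int) < 123))
      = x.toList.countP (fun ch => decide (65 ≤ ch.toNat ∧ ch.toNat ≤ 122)) := by
    apply List.countP_congr
    intro a _
    simp only [decide_eq_true_eq]
    omega
  rw [hdig] at hA1
  rw [hlet] at hA2
  -- A's x[5] loop counter is positive iff B's is_car test holds
  have hcval : (PySem.List.pyRange 48 58 1).foldl (fun c i =>
      if x5 == Char.ofNat i.toNat then c + 1 else c) (0:Int)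
      = if 48 ≤ (x5.toNat:Int) ∧ (x5.toNat:Int) < 58 then 1 else 0 := by
    refine (PySem.List.foldl_congr_mem (PySem.List.pyRange 48 58 1)
        (fun (c : Int) (i : Int) => if x5 == Char.ofNat i.toNat then c + 1 else c)
        (fun (c : Int) (i : Int) => c + (if x5 == Char.ofNat i.toNat then (1:Int) else 0)) 0 ?_).trans ?_
    · intro acc i _; dsimp only; split_ifs <;> omega
    · rw [PySem.List.foldl_add, sum_ind x5 10 48 58 (by norm_num) (by norm_num) (by norm_num), zero_add]
  have hcar_iff : (('0' ≤ x5) ∧ (x5 ≤ '9')) ↔ (48 ≤ x5.toNat ∧ x5.toNat ≤ 57) := by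
    rw [Char.le_def, Char.le_def, UInt32.le_iff_toNat_le, UInt32.le_iff_toNat_le]
    exact Iff.rfl
  have hc : ((PySem.List.pyRange 48 58 1).foldl (fun c i =>
      if x5 == Char.ofNat i.toNat then c + 1 else c) (0:Int) > 0) ↔ ('0' ≤ x5 && x5 ≤ '9') = true := by
    rw [hcval]
    simp only [Bool.and_eq_true, decide_eq_true_eq]
    rw [hcar_iff]
    constructor
    · intro h
      by_contra hn
      rw [if_neg (by omega)] at h
      omega
    · intro h
      rw [if_pos (by omega)]
      omega
  simp only [hA1, hA2, hB, zero_add]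
  split_ifs <;> first
    | rfl
    | (exact absurd (hc.mp (by assumption)) (by assumption))
    | (exact absurd (hc.mpr (by assumption)) (by assumption))
    | simp_all
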